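-- pv_equiv track=rewrite | github.com/eecs291staff/eecs291-w26 | lab/lab01/lab01_solution.py | top_players_by_stat
-- ===== SOURCE A (Python) =====
-- def top_players_by_stat(
--     totals: dict[str, dict[str, int]],
--     stat: str,
--     n: int = 3,
-- ) -> list[tuple[str, int]]:
--     """Return the top N players by a chosen stat."""
--     # TODO: sort by stat desc
--
--     players: list[tuple[str, dict[str, int]]] = list(totals.items())
--
--     def player_sorter(player: tuple[str, dict[str, int]]):
--         player_id, player_stats = player
--         return player_stats[stat]
--
--     # players.sort(key=player_sorter, reverse=True)
--
--     players.sort(key=lambda player: player[1][stat], reverse=True)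
--
--     processed_players = []
--
--     for player_id, player_stats in players:
--         processed_players.append((player_id, player_stats[stat]))
--
--     return processed_players[:n]
-- ===== SOURCE B (Python) =====
-- def top_players_by_stat(
--     totals: dict[str, dict[str, int]],
--     stat: str,
--     n: int = 3,
-- ) -> list[tuple[str, int]]:
--     """Return the top N players by a chosen stat.
--
--     Partial selection: keep only the current top-k in a small sorted buffer
--     instead of sorting the whole table and slicing."""
--     k = n if n >= 0 else len(totals) + n
--     if k <= 0:
--         return []
--     best: list[tuple[str, int]] = []
--     for pid, stats in totals.items():
--         v = stats[stat]
--         if len(best) == k and v <= best[-1][1]: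
--             continue
--         pos = 0
--         while pos < len(best) and best[pos][1] >= v:
--             pos += 1
--         best.insert(pos, (pid, v))
--         if len(best) > k:
--             best.pop()
--     return best
-- ===== Notes on version B (the rewrite author's own statement) =====
-- stated objective: alternative
-- what changed: A sorts the whole table descending and slices the first n; B never sorts: it makes one pass over the players, maintaining only the current top-k in a small sorted buffer (skipping any player that cannot enter a full buffer), with k precomputed to reproduce Python's [:n] slice semantics for negative n.
import Mathlib
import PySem

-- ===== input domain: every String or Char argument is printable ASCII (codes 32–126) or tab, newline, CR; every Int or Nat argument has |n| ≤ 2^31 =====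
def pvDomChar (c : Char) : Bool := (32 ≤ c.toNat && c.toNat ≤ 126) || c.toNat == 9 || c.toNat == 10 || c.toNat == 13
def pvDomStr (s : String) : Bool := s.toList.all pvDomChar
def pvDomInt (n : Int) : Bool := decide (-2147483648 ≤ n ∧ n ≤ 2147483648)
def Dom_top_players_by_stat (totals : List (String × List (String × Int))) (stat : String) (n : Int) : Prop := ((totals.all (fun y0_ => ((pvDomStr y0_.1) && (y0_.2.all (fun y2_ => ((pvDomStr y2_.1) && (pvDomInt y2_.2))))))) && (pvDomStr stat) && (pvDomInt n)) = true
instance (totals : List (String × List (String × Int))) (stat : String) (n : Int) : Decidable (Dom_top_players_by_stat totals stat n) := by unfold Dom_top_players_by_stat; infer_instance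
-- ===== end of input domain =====

-- B replaces A's full sort-then-slice by a single pass keeping only the current top-k
-- in a small sorted buffer (partial selection); return value only, no mutation is observable.

-- ===== PORT A =====
def top_players_by_stat (totals : List (String × List (String × Int))) (stat : String) (n : Int) : List (String × Int) :=
  let players := (PySem.Dict.mk totals).items
  let sortedPlayers := PySem.List.sorted players (fun p => (PySem.Dict.mk p.2).getD stat 0) true
  let processed := sortedPlayers.foldl (fun acc p => acc ++ [(p.1, (PySem.Dict.mk p.2).getD stat 0)]) ([] : List (String × Int))
  PySem.List.slice processed none (some n)

-- ===== PORT B =====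
-- the scan "pos = 0; while pos < len(best) and best[pos][1] >= v: pos += 1; best.insert(pos, x)"
def pvInsTop (x : String × Int) : List (String × Int) → List (String × Int)
  | [] => [x]
  | y :: ys => if x.2 ≤ y.2 then y :: pvInsTop x ys else x :: y :: ys

-- one iteration of B's loop body
def pvStepTop (stat : String) (k : Int) (buf : List (String × Int)) (p : String × List (String × Int)) : List (String × Int) :=
  let v := (PySem.Dict.mk p.2).getD stat 0
  if ((buf.length : Int) == k && (match buf.getLast? with | some y => decide (v ≤ y.2) | none => false)) then buf
  else
    let buf' := pvInsTop (p.1, v) buf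
    if (buf'.length : Int) > k then buf'.dropLast else buf'

def top_players_by_stat_alt (totals : List (String × List (String × Int))) (stat : String) (n : Int) : List (String × Int) :=
  let k : Int := if 0 ≤ n then n else ((PySem.Dict.mk totals).items.length : Int) + n
  if k ≤ 0 then []
  else ((PySem.Dict.mk totals).items).foldl (pvStepTop stat k) []

-- ===== PRECONDITION & SPEC =====
-- Pre_ excludes exactly the inputs on which Python A raises KeyError: some player's stats dict lacks the chosen stat.
def Pre_top_players_by_stat (totals : List (String × List (String × Int))) (stat : String) (n : Int) : Prop :=
  ∀ p ∈ totals, (PySem.Dict.mk p.2).contains stat = true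
instance (totals : List (String × List (String × Int))) (stat : String) (n : Int) : Decidable (Pre_top_players_by_stat totals stat n) := by unfold Pre_top_players_by_stat; infer_instance

def pvWitness_top_players_by_stat : (List (String × List (String × Int))) × String × Int :=
  ([("alice", [("goals", 3)]), ("bob", [("goals", 5)]), ("carol", [("goals", 4)])], "goals", 2)

def Spec_top_players_by_stat (totals : List (String × List (String × Int))) (stat : String) (n : Int) (out : List (String × Int)) : Prop := out = top_players_by_stat_alt totals stat n
instance (totals : List (String × List (String × Int))) (stat : String) (n : Int) (out : List (String × Int)) : Decidable (Spec_top_players_by_stat totals stat n out) := by unfold Spec_top_players_by_stat; infer_instance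

-- ===== CLAIM (what is proved, stated in full; the proofs are below) =====
def Claim_equal_top_players_by_stat : Prop := ∀ (totals : List (String × List (String × Int))) (stat : String) (n : Int), Dom_top_players_by_stat totals stat n → Pre_top_players_by_stat totals stat n → Spec_top_players_by_stat totals stat n (top_players_by_stat totals stat n)

-- ===== LEMMAS AND PROOFS =====

def pvKeyOf (stat : String) (p : String × List (String × Int)) : Int := (PySem.Dict.mk p.2).getD stat 0
def pvF (stat : String) (p : String × List (String × Int)) : String × Int := (p.1, pvKeyOf stat p)
def pvInsR (x : String × Int) (ys : List (String × Int)) : List (String × Int) :=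
  PySem.List.insertBy (fun a b => decide (b.2 < a.2)) x ys
def pvS (zs : List (String × Int)) : List (String × Int) := PySem.List.sorted zs (fun r => r.2) true

theorem pvInsTop_eq (x : String × Int) (ys : List (String × Int)) :
    pvInsTop x ys = pvInsR x ys := by
  induction ys with
  | nil => rfl
  | cons y ys ih =>
    simp only [pvInsTop, pvInsR, PySem.List.insertBy] at *
    by_cases h : x.2 ≤ y.2
    · simp [h, ih, not_lt.mpr h]
    · simp [h, lt_of_not_ge h]

theorem pv_length_insertBy (bf : (String × Int) → (String × Int) → Bool) (x : String × Int) (ys : List (String × Int)) :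
    (PySem.List.insertBy bf x ys).length = ys.length + 1 := by
  induction ys with
  | nil => rfl
  | cons y ys ih =>
    simp only [PySem.List.insertBy]
    by_cases h : bf x y <;> simp [h, ih]

theorem pv_trunc (bf : (String × Int) → (String × Int) → Bool) (x : String × Int) :
    ∀ (ys : List (String × Int)) (kn : Nat),
    (PySem.List.insertBy bf x (ys.take kn)).take kn = (PySem.List.insertBy bf x ys).take kn := by
  intro ys
  induction ys with
  | nil => intro kn; simp
  | cons y ys ih =>
    intro kn
    cases kn with
    | zero => simp
    | succ kn =>
      simp only [List.take_succ_cons, PySem.List.insertBy]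
      by_cases h : bf x y
      · cases kn with
        | zero => simp [h]
        | succ m =>
          simp only [h, if_true, List.take_succ_cons, List.take_take]
          rw [Nat.min_eq_left (by omega)]
      · simp [h, ih kn]

theorem pv_noins (bf : (String × Int) → (String × Int) → Bool) (x : String × Int) :
    ∀ (ys : List (String × Int)) (kn : Nat), kn ≤ ys.length →
    (∀ y ∈ ys.take kn, bf x y = false) →
    (PySem.List.insertBy bf x ys).take kn = ys.take kn := by
  intro ys
  induction ys with
  | nil => intro kn h _; simp at h; simp [h]
  | cons y ys ih =>
    intro kn hlen hall
    cases kn with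
    | zero => simp
    | succ kn =>
      have hy : bf x y = false := hall y (by simp)
      simp only [PySem.List.insertBy, hy, Bool.false_eq_true, if_false, List.take_succ_cons]
      congr 1
      exact ih kn (by simpa using hlen) (fun z hz => hall z (by simp [hz]))

-- every element of the first kn entries of a descending list is ≥ the kn-1st entry
theorem pv_desc_bound (ys : List (String × Int)) (hp : ys.Pairwise (fun a b => b.2 ≤ a.2))
    (kn : Nat) (hk : 0 < kn) (hlen : kn ≤ ys.length) (v : Int)
    (hv : v ≤ (ys[kn - 1]'(by omega)).2) :
    ∀ y ∈ ys.take kn, ¬ (y.2 < v) := by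
  intro y hy
  rw [List.mem_take_iff_getElem] at hy
  obtain ⟨i, hi, rfl⟩ := hy
  have hi' : i < kn := by omega
  have hilen : i < ys.length := by omega
  rcases Nat.lt_or_ge i (kn - 1) with h | h
  · have := (List.pairwise_iff_getElem.mp hp) i (kn - 1) hilen (by omega) (by omega)
    omega
  · have : i = kn - 1 := by omega
    subst this
    omega

theorem pv_step (stat : String) (kn : Nat) (hk : 0 < kn) (ys : List (String × Int))
    (hp : ys.Pairwise (fun a b => b.2 ≤ a.2)) (p : String × List (String × Int)) :
    pvStepTop stat (kn : Int) (ys.take kn) p = (pvInsR (pvF stat p) ys).take kn := by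
  by_cases hlen : kn ≤ ys.length
  · have hblen : (ys.take kn).length = kn := by simp [List.length_take]; omega
    have hlast : (ys.take kn).getLast? = some (ys[kn - 1]'(by omega)) := by
      rw [List.getLast?_eq_getElem?, hblen, List.getElem?_take]
      simp only [if_pos (by omega : kn - 1 < kn)]
      rw [List.getElem?_eq_getElem (by omega)]
    by_cases hvle : (PySem.Dict.mk p.2).getD stat 0 ≤ (ys[kn - 1]'(by omega)).2
    · -- buffer full and v no better than the current minimum: B skips, the sorted prefix is unchanged
      simp only [pvStepTop, hlast, hblen]
      rw [if_pos (by simp [hvle])]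
      refine (pv_noins _ _ ys kn hlen ?_).symm
      intro y hy
      simpa using pv_desc_bound ys hp kn hk hlen _ hvle y hy
    · simp only [pvStepTop, hlast, hblen]
      rw [if_neg (by simp [hvle])]
      rw [pvInsTop_eq]
      have hlen' : (pvInsR (p.1, (PySem.Dict.mk p.2).getD stat 0) (ys.take kn)).length = kn + 1 := by
        rw [pvInsR, pv_length_insertBy, hblen]
      rw [if_pos (by rw [hlen']; exact_mod_cast by omega)]
      rw [List.dropLast_eq_take, hlen']
      simp only [Nat.add_sub_cancel]
      exact pv_trunc _ _ ys kn
  · have hbuf : ys.take kn = ys := List.take_of_length_le (by omega)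
    simp only [pvStepTop, hbuf]
    rw [if_neg (by simp; intro h; omega)]
    rw [pvInsTop_eq]
    have hlen' : (pvInsR (p.1, (PySem.Dict.mk p.2).getD stat 0) ys).length = ys.length + 1 := by
      rw [pvInsR, pv_length_insertBy]
    rw [if_neg (by rw [hlen']; push_cast; omega)]
    exact (List.take_of_length_le (by rw [hlen']; omega)).symm

theorem pv_sorted_append (pre : List (String × Int)) (r : String × Int) :
    pvS (pre ++ [r]) = pvInsR r (pvS pre) := by
  simp only [pvS, PySem.List.sorted_rev_eq_foldl_insertBy, List.foldl_append, List.foldl_cons, List.foldl_nil]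
  rfl

theorem pv_main (stat : String) (kn : Nat) (hk : 0 < kn) :
    ∀ (l : List (String × List (String × Int))) (pre : List (String × Int)),
    l.foldl (pvStepTop stat (kn : Int)) ((pvS pre).take kn) = (pvS (pre ++ l.map (pvF stat))).take kn := by
  intro l
  induction l with
  | nil => intro pre; simp
  | cons x l ih =>
    intro pre
    have hstep : pvStepTop stat (kn : Int) ((pvS pre).take kn) x = (pvS (pre ++ [pvF stat x])).take kn := by
      rw [pv_sorted_append]
      exact pv_step stat kn hk (pvS pre) (PySem.List.sorted_pairwise_rev pre (fun r => r.2)) x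
    calc (x :: l).foldl (pvStepTop stat (kn : Int)) ((pvS pre).take kn)
        = l.foldl (pvStepTop stat (kn : Int)) ((pvS (pre ++ [pvF stat x])).take kn) := by
          rw [List.foldl_cons, hstep]
      _ = (pvS ((pre ++ [pvF stat x]) ++ l.map (pvF stat))).take kn := ih (pre ++ [pvF stat x])
      _ = (pvS (pre ++ (x :: l).map (pvF stat))).take kn := by simp

theorem pv_insertBy_map (stat : String) (x : String × List (String × Int)) (acc : List (String × List (String × Int))) :
    PySem.List.insertBy (fun a b => decide (b.2 < a.2)) (pvF stat x) (acc.map (pvF stat))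
      = (PySem.List.insertBy (fun a b => decide (pvKeyOf stat b < pvKeyOf stat a)) x acc).map (pvF stat) := by
  induction acc with
  | nil => rfl
  | cons y ys ih =>
    simp only [List.map_cons, PySem.List.insertBy]
    by_cases h : pvKeyOf stat y < pvKeyOf stat x
    · simp [pvF, h]
    · simp only [pvF, pvKeyOf, decide_eq_true_eq] at *
      simp [h, ih, pvF, pvKeyOf]

theorem pv_mapsort (stat : String) (l : List (String × List (String × Int))) :
    pvS (l.map (pvF stat)) = (PySem.List.sorted l (pvKeyOf stat) true).map (pvF stat) := by
  simp only [pvS, PySem.List.sorted_rev_eq_foldl_insertBy]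
  induction l using List.reverseRecOn with
  | nil => rfl
  | append_singleton l x ih =>
    simp only [List.map_append, List.map_cons, List.map_nil, List.foldl_append, List.foldl_cons, List.foldl_nil, ih]
    exact pv_insertBy_map stat x (l.foldl (fun acc x => PySem.List.insertBy (fun a b => decide (pvKeyOf stat b < pvKeyOf stat a)) x acc) [])

-- ===== VERDICT (by name: the statement is the Claim_ definition above) =====
theorem pv_A_eq (totals : List (String × List (String × Int))) (stat : String) (n : Int) :
    top_players_by_stat totals stat n
      = PySem.List.slice ((PySem.List.sorted totals (pvKeyOf stat) true).map (pvF stat)) none (some n) := by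
  simp only [top_players_by_stat]
  have h := PySem.List.foldl_append_singleton_eq_map
    (fun p : String × List (String × Int) => (p.1, (PySem.Dict.mk p.2).getD stat 0))
    (PySem.List.sorted totals (fun p => (PySem.Dict.mk p.2).getD stat 0) true) []
  rw [h]
  rfl

theorem top_players_by_stat_spec : Claim_equal_top_players_by_stat := by
  intro totals stat n _ _
  unfold Spec_top_players_by_stat
  rw [pv_A_eq]
  set processed := (PySem.List.sorted totals (pvKeyOf stat) true).map (pvF stat) with hproc
  have hm : processed.length = totals.length := by
    rw [hproc, List.length_map, PySem.List.length_sorted]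
  have hslice : PySem.List.slice processed none (some n)
      = processed.take (PySem.List.clampIdx processed.length n) := by
    simp [PySem.List.slice]
  rw [hslice]
  show _ = top_players_by_stat_alt totals stat n
  simp only [top_players_by_stat_alt]
  set k : Int := if 0 ≤ n then n else ((totals.length : Nat) : Int) + n with hkdef
  by_cases hk : k ≤ 0
  · rw [if_pos hk]
    have : PySem.List.clampIdx processed.length n = 0 := by
      rw [hm]
      simp only [PySem.List.clampIdx]
      split_ifs <;> omega
    rw [this, List.take_zero]
  · rw [if_neg hk]
    have hk0 : 0 < k := by omega
    have hkn : ((k.toNat : Nat) : Int) = k := Int.toNat_of_nonneg (by omega)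
    have hmain := pv_main stat k.toNat (by omega) totals []
    have hinit : (pvS []).take k.toNat = ([] : List (String × Int)) := by
      rw [show pvS [] = [] from rfl, List.take_nil]
    rw [hinit] at hmain
    rw [hkn] at hmain
    rw [hmain, List.nil_append, pv_mapsort, ← hproc]
    rw [List.take_eq_take_iff, hm]
    simp only [PySem.List.clampIdx]
    by_cases hn : 0 ≤ n
    · rw [if_neg (by omega)]
      simp only [hn, if_true] at hkdef
      omega
    · rw [if_pos (by omega)]
      simp only [hn, if_false] at hkdef
      rw [if_neg (by omega)]
      omega
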